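-- pv_equiv track=rewrite | github.com/15680676726/superSpider | src/copaw/kernel/surface_routing.py | _search_blob
-- ===== SOURCE A (Python) =====
-- from collections.abc import Iterable, Sequence
-- from typing import Any
--
-- def _search_blob(values: Sequence[str] | None) -> str:
--     lowered = [
--         text.lower()
--         for text in _string_list(values)
--     ]
--     if not lowered:
--         return " "
--     return f" {' '.join(lowered)} "
--
-- def _string(value: object | None) -> str | None:
--     if value is None:
--         return None
--     text = value if isinstance(value, str) else str(value)
--     text = text.strip()
--     return text or None
--
-- def _string_list(values: Sequence[Any] | None) -> list[str]:
--     resolved: list[str] = []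
--     if values is None:
--         return resolved
--     for value in values:
--         if isinstance(value, (list, tuple, set)):
--             resolved.extend(_string_list(list(value)))
--             continue
--         text = _string(value)
--         if text is not None:
--             resolved.append(text)
--     return resolved
-- ===== SOURCE B (Python) =====
-- def _search_blob(values):
--     if values is None:
--         return " "
--     parts = []
--     stack = list(values)
--     stack.reverse()
--     while stack:
--         v = stack.pop()
--         if isinstance(v, (list, tuple, set)):
--             stack.extend(reversed(list(v)))
--             continue
--         if v is None:
--             continue
--         t = (v if isinstance(v, str) else str(v)).strip().lower()
--         if t:
--             parts.append(" " + t)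
--     return "".join(parts) + " " if parts else " "
-- ===== Notes on version B (the rewrite author's own statement) =====
-- stated objective: alternative
-- what changed: Replaces the recursive _string_list helper + list comprehension + join with a single explicit-stack pass that builds the blob string directly in one accumulator, with no intermediate lists.
import Mathlib
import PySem

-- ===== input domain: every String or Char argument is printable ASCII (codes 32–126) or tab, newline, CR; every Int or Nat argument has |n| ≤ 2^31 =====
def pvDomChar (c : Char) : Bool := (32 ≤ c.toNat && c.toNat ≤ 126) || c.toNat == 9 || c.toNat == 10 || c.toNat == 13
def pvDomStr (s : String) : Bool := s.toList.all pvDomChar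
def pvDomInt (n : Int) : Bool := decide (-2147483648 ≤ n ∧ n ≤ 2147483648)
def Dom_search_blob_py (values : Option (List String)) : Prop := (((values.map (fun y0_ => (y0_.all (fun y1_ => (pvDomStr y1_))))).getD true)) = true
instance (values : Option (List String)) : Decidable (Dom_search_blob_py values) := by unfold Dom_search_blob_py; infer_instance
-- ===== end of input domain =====

-- B replaces the recursive helper + list comprehension + join with one explicit-stack pass
-- building the blob string directly in a single accumulator (return value only; no mutation observable).

-- ===== PORT A =====
-- _string: strip; empty becomes None (here: ""). Elements are strings, so the isinstance/str() branch is identity.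
def pvStringA (value : String) : String := PySem.Str.strip value

-- _string_list over a list of strings: the list/tuple/set branch is unreachable for String elements.
def pvStringListA : List String → List String
  | [] => []
  | v :: rest =>
      let text := pvStringA v
      if text = "" then pvStringListA rest else text :: pvStringListA rest

def search_blob_py (values : Option (List String)) : String :=
  let resolved := match values with
    | none => []
    | some vs => pvStringListA vs
  let lowered := resolved.map PySem.Str.lower
  if lowered = [] then " " else " " ++ PySem.Str.join " " lowered ++ " "

-- ===== PORT B =====
-- Source B's while-stack loop: elements are plain strings, so each iteration pops one element in
-- original order (stack was reversed, pop takes from the end) and appends " "+t to parts.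
def pvAltLoop : List String → List String → List String
  | [], parts => parts
  | v :: stack, parts =>
      let t := PySem.Str.lower (PySem.Str.strip v)
      if t = "" then pvAltLoop stack parts else pvAltLoop stack (parts ++ [" " ++ t])

def search_blob_py_alt (values : Option (List String)) : String :=
  match values with
  | none => " "
  | some vs =>
      let parts := pvAltLoop vs []
      if parts = [] then " " else PySem.Str.join "" parts ++ " "

-- ===== PRECONDITION & SPEC =====
def Spec_search_blob_py (values : Option (List String)) (out : String) : Prop := out = search_blob_py_alt values
instance (values : Option (List String)) (out : String) : Decidable (Spec_search_blob_py values out) := by unfold Spec_search_blob_py; infer_instance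

-- ===== CLAIM (what is proved, stated in full; the proofs are below) =====
def Claim_equal_search_blob_py : Prop := ∀ (values : Option (List String)), Dom_search_blob_py values → Spec_search_blob_py values (search_blob_py values)

-- ===== LEMMAS AND PROOFS =====

-- the blob A's pipeline produces from the resolved list, written as a right fold
def pvBlobOf (l : List String) : String :=
  l.foldr (fun t r => " " ++ PySem.Str.lower t ++ r) ""

theorem pvLower_eq_empty_iff (s : String) : PySem.Str.lower s = "" ↔ s = "" := by
  constructor
  · intro h
    have h2 := congrArg String.toList h
    simp [PySem.Str.toList_lower, PySem.Chars.lower] at h2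
    exact h2
  · intro h; subst h; rfl

theorem pvAltLoop_eq (vs : List String) (parts : List String) :
    pvAltLoop vs parts = parts ++ (pvStringListA vs).map (fun t => " " ++ PySem.Str.lower t) := by
  induction vs generalizing parts with
  | nil => simp [pvAltLoop, pvStringListA]
  | cons v rest ih =>
    simp only [pvAltLoop, pvStringListA, pvStringA]
    by_cases h : PySem.Str.strip v = ""
    · simp [h, pvLower_eq_empty_iff, ih]
    · have hl : ¬ PySem.Str.lower (PySem.Str.strip v) = "" := by
        simpa [pvLower_eq_empty_iff] using h
      simp [h, hl, ih]

theorem pvJoin_parts (l : List String) :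
    PySem.Str.join "" (l.map (fun t => " " ++ PySem.Str.lower t)) = pvBlobOf l := by
  induction l with
  | nil => rfl
  | cons a rest ih =>
    cases rest with
    | nil =>
      apply String.toList_inj.mp
      simp [pvBlobOf, PySem.Chars.join_singleton]
    | cons b rs =>
      have ih2 := congrArg String.toList ih
      apply String.toList_inj.mp
      simp [pvBlobOf, PySem.Chars.join_cons_cons] at ih2 ⊢
      simp [ih2]

theorem pvBlob_join (l : List String) (hne : l ≠ []) :
    " " ++ PySem.Str.join " " (l.map PySem.Str.lower) = pvBlobOf l := by
  induction l with
  | nil => exact absurd rfl hne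
  | cons a rest ih =>
    cases rest with
    | nil =>
      apply String.toList_inj.mp
      simp [pvBlobOf, PySem.Chars.join_singleton]
    | cons b rs =>
      have ih2 := congrArg String.toList (ih (by simp))
      apply String.toList_inj.mp
      simp [pvBlobOf, PySem.Chars.join_cons_cons] at ih2 ⊢
      simp [ih2]

-- ===== VERDICT (by name: the statement is the Claim_ definition above) =====
theorem search_blob_py_spec : Claim_equal_search_blob_py := by
  intro values _
  unfold Spec_search_blob_py search_blob_py search_blob_py_alt
  cases values with
  | none => rfl
  | some vs =>
    simp only [pvAltLoop_eq, List.nil_append]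
    cases hl : pvStringListA vs with
    | nil => simp
    | cons a rest =>
      have hj := pvBlob_join (a :: rest) (by simp)
      rw [if_neg (by simp : ¬ (List.map PySem.Str.lower (a :: rest) = ([] : List String))),
          if_neg (by simp : ¬ ((a :: rest).map (fun t => " " ++ PySem.Str.lower t) = ([] : List String)))]
      rw [pvJoin_parts, hj]
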